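-- pv_equiv track=rewrite | github.com/decrypto-org/rupture | etc/theory/idealness_experiments/analysis.py | get_ideal_tree
-- ===== SOURCE A (Python) =====
-- def get_ideal_tree(freq_list):
--     freq_list = sorted(freq_list, reverse=True)
--     output = []
--     output.append('Char\t#\tHuff.codelen')
--     tree = []
--     for (current_occ, current_char) in freq_list:
--         if tree:
--             previous = tree[-1]
--             if current_occ == previous[1]:
--                 tree.append((current_char, current_occ, previous[2]))
--             else:
--                 tree.append((current_char, current_occ, previous[2]+1))
--         else:
--             tree.append((current_char, current_occ, 1))
--     for n in tree:
--         output.append('{}\t{}\t{}'.format(repr(n[0]), n[1], n[2]))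
--     return '\n'.join(output)
-- ===== SOURCE B (Python) =====
-- def get_ideal_tree(freq_list):
--     occs = {occ for occ, _ in freq_list}
--     output = ['Char\t#\tHuff.codelen']
--     for occ, char in sorted(freq_list, reverse=True):
--         codelen = sum(1 for o in occs if o >= occ)
--         output.append('{}\t{}\t{}'.format(repr(char), occ, codelen))
--     return '\n'.join(output)
-- ===== Notes on version B (the rewrite author's own statement) =====
-- stated objective: alternative
-- what changed: B drops A's stateful scan (tracking the previous tree entry and incrementing the code length on change) entirely: it builds the set of distinct occurrence counts once and computes each row's code length as a closed-form rank, the number of distinct occurrences >= that row's occurrence.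
import Mathlib
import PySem

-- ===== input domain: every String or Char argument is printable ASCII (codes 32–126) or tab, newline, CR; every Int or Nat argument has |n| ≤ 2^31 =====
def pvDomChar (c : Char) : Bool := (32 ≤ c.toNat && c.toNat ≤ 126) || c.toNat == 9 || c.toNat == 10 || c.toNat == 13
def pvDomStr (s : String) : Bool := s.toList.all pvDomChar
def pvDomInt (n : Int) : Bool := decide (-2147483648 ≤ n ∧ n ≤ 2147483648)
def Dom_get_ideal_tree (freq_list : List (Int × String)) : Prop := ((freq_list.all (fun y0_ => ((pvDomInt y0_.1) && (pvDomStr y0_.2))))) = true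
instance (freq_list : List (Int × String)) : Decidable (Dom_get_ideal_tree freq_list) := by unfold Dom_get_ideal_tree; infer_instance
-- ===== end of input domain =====

-- B drops A's stateful previous-entry/increment-on-change scan: it builds the set of
-- distinct occurrence counts once and computes each row's code length as a closed-form
-- rank (the number of distinct occurrences ≥ that row's occurrence); same results,
-- genuinely different algorithm, no speed claim.

-- shared helpers: Python's repr(str) (exact on the printable-ASCII + tab/newline/CR domain)
-- and the '{}\t{}\t{}' row format, used identically by both Pythons
def pyReprChar (q : Char) (c : Char) : List Char :=
  if c = '\\' then ['\\', '\\']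
  else if c = q then ['\\', q]
  else if c = '\t' then ['\\', 't']
  else if c = '\n' then ['\\', 'n']
  else if c = '\r' then ['\\', 'r']
  else [c]

def pyReprStr (s : String) : String :=
  let cs := s.toList
  let q : Char := if '\'' ∈ cs ∧ '"' ∉ cs then '"' else '\''
  String.ofList (q :: cs.flatMap (pyReprChar q) ++ [q])

def fmtRow (ch : String) (occ : Int) (codelen : Int) : String :=
  PySem.Str.join "\t" [pyReprStr ch, PySem.Int.toStr occ, PySem.Int.toStr codelen]

-- ===== PORT A =====
-- one iteration of A's loop over the sorted list, appending to `tree`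
def aStep (tree : List (String × Int × Int)) (p : Int × String) : List (String × Int × Int) :=
  match tree.getLast? with
  | some previous =>
      if p.1 = previous.2.1 then tree ++ [(p.2, p.1, previous.2.2)]
      else tree ++ [(p.2, p.1, previous.2.2 + 1)]
  | none => tree ++ [(p.2, p.1, 1)]

def get_ideal_tree (freq_list : List (Int × String)) : String :=
  let fl := PySem.List.sorted2 freq_list (fun p => p.1) (fun p => p.2) true
  let tree := fl.foldl aStep []
  let output := "Char\t#\tHuff.codelen" :: tree.map (fun n => fmtRow n.1 n.2.1 n.2.2)
  PySem.Str.join "\n" output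

-- ===== PORT B =====
def get_ideal_tree_alt (freq_list : List (Int × String)) : String :=
  let occs : PySem.Set Int := PySem.Set.ofList (freq_list.map (fun p => p.1))
  let output := (PySem.List.sorted2 freq_list (fun p => p.1) (fun p => p.2) true).foldl
    (fun acc p =>
      -- codelen = sum(1 for o in occs if o >= occ): order-independent consumption of the set
      let codelen : Int := occs.foldl (fun s o => if p.1 ≤ o then s + 1 else s) 0
      acc ++ [fmtRow p.2 p.1 codelen]) ["Char\t#\tHuff.codelen"]
  PySem.Str.join "\n" output

-- ===== PRECONDITION & SPEC =====
def Spec_get_ideal_tree (freq_list : List (Int × String)) (out : String) : Prop := out = get_ideal_tree_alt freq_list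
instance (freq_list : List (Int × String)) (out : String) : Decidable (Spec_get_ideal_tree freq_list out) := by unfold Spec_get_ideal_tree; infer_instance

-- ===== CLAIM (what is proved, stated in full; the proofs are below) =====
def Claim_equal_get_ideal_tree : Prop := ∀ (freq_list : List (Int × String)), Dom_get_ideal_tree freq_list → Spec_get_ideal_tree freq_list (get_ideal_tree freq_list)

-- ===== LEMMAS AND PROOFS =====

-- A's reference recursion: the triples A builds after the first element,
-- given the previous occurrence o0 and its code length k
def auxTriples (o0 k : Int) : List (Int × String) → List (String × Int × Int)
  | [] => []
  | (o, c) :: t => if o = o0 then (c, o, k) :: auxTriples o k t else (c, o, k + 1) :: auxTriples o (k + 1) t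

theorem foldl_aStep_eq (xs : List (Int × String)) :
    ∀ (tree : List (String × Int × Int)) (c0 : String) (o0 k0 : Int),
      tree.getLast? = some (c0, o0, k0) →
      xs.foldl aStep tree = tree ++ auxTriples o0 k0 xs := by
  induction xs with
  | nil => intro tree c0 o0 k0 _; simp [auxTriples]
  | cons p t ih =>
    intro tree c0 o0 k0 h
    obtain ⟨o, c⟩ := p
    by_cases ho : o = o0
    · have : aStep tree (o, c) = tree ++ [(c, o, k0)] := by
        simp [aStep, h, ho]
      rw [List.foldl_cons, this, ih _ c o k0 (by simp), auxTriples, if_pos ho]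
      simp
    · have : aStep tree (o, c) = tree ++ [(c, o, k0 + 1)] := by
        simp [aStep, h, ho]
      rw [List.foldl_cons, this, ih _ c o (k0 + 1) (by simp), auxTriples, if_neg ho]
      simp

-- counting lemmas about the rank "number of elements ≥ o" in a duplicate-free list
theorem countP_ge_succ (o o0 : Int) (h : o < o0) :
    ∀ (S : List Int), S.Nodup → o ∈ S → (∀ v ∈ S, o0 ≤ v ∨ v ≤ o) →
      S.countP (fun v => decide (o ≤ v)) = S.countP (fun v => decide (o0 ≤ v)) + 1 := by
  intro S
  induction S with
  | nil => intro _ hmem _; simp at hmem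
  | cons a T ih =>
    intro hnd hmem hcov
    rcases List.mem_cons.mp hmem with rfl | hoT
    · have hT : T.countP (fun v => decide (o ≤ v)) = T.countP (fun v => decide (o0 ≤ v)) := by
        apply List.countP_congr
        intro v hv
        have hne : v ≠ o := fun he => (List.nodup_cons.mp hnd).1 (he ▸ hv)
        rcases hcov v (List.mem_cons_of_mem _ hv) with h1 | h2
        · simp [h1, le_trans (le_of_lt h) h1]
        · have hvo : v < o := lt_of_le_of_ne h2 hne
          simp [not_le.mpr hvo, not_le.mpr (lt_trans hvo h)]
      simp [hT, not_le.mpr h]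
    · have hrec := ih (List.nodup_cons.mp hnd).2 hoT
        (fun v hv => hcov v (List.mem_cons_of_mem _ hv))
      rcases hcov a (List.mem_cons_self) with h1 | h2
      · simp [hrec, h1, le_trans (le_of_lt h) h1]
      · have hne : a ≠ o := fun he => (List.nodup_cons.mp hnd).1 (he ▸ hoT)
        have hao : a < o := lt_of_le_of_ne h2 hne
        simp [hrec, not_le.mpr hao, not_le.mpr (lt_trans hao h)]

theorem countP_ge_max (o : Int) :
    ∀ (S : List Int), S.Nodup → o ∈ S → (∀ v ∈ S, v ≤ o) →
      S.countP (fun v => decide (o ≤ v)) = 1 := by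
  intro S
  induction S with
  | nil => intro _ hmem _; simp at hmem
  | cons a T ih =>
    intro hnd hmem hle
    rcases List.mem_cons.mp hmem with rfl | hoT
    · have hT : T.countP (fun v => decide (o ≤ v)) = 0 := by
        rw [List.countP_eq_zero]
        intro v hv
        have hne : v ≠ o := fun he => (List.nodup_cons.mp hnd).1 (he ▸ hv)
        simp [not_le.mpr (lt_of_le_of_ne (hle v (List.mem_cons_of_mem _ hv)) hne)]
      simp [hT]
    · have hne : a ≠ o := fun he => (List.nodup_cons.mp hnd).1 (he ▸ hoT)
      have : a < o := lt_of_le_of_ne (hle a List.mem_cons_self) hne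
      simp [ih (List.nodup_cons.mp hnd).2 hoT
        (fun v hv => hle v (List.mem_cons_of_mem _ hv)), not_le.mpr this]

-- A's incremental ranks equal B's closed-form rank, under the loop invariants
theorem auxTriples_eq_rank (S : List Int) (hnd : S.Nodup) :
    ∀ (t : List (Int × String)) (o0 : Int),
      t.Pairwise (fun a b => b.1 ≤ a.1) →
      (∀ p ∈ t, p.1 ≤ o0) →
      (∀ p ∈ t, p.1 ∈ S) →
      (∀ v ∈ S, o0 ≤ v ∨ ∃ p ∈ t, v = p.1) →
      auxTriples o0 ((S.countP (fun v => decide (o0 ≤ v)) : Int)) t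
        = t.map (fun p => (p.2, p.1, (S.countP (fun v => decide (p.1 ≤ v)) : Int))) := by
  intro t
  induction t with
  | nil => intro o0 _ _ _ _; simp [auxTriples]
  | cons p t ih =>
    intro o0 hpw hle hmem hS
    obtain ⟨o, c⟩ := p
    have hpw' := (List.pairwise_cons.mp hpw).2
    have hhd := (List.pairwise_cons.mp hpw).1
    have hle' : ∀ q ∈ t, q.1 ≤ o := fun q hq => hhd q hq
    have hmem' : ∀ q ∈ t, q.1 ∈ S := fun q hq => hmem q (List.mem_cons_of_mem _ hq)
    have hS' : ∀ v ∈ S, o ≤ v ∨ ∃ q ∈ t, v = q.1 := by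
      intro v hv
      rcases hS v hv with h1 | ⟨q, hq, rfl⟩
      · exact Or.inl (le_trans (hle (o, c) List.mem_cons_self) h1)
      · rcases List.mem_cons.mp hq with rfl | hq'
        · exact Or.inl le_rfl
        · exact Or.inr ⟨q, hq', rfl⟩
    by_cases ho : o = o0
    · subst ho
      rw [auxTriples, if_pos rfl, ih o hpw' hle' hmem' hS']
      simp
    · have holt : o < o0 := lt_of_le_of_ne (hle (o, c) List.mem_cons_self) ho
      have hcov : ∀ v ∈ S, o0 ≤ v ∨ v ≤ o := by
        intro v hv
        rcases hS v hv with h1 | ⟨q, hq, rfl⟩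
        · exact Or.inl h1
        · rcases List.mem_cons.mp hq with rfl | hq'
          · exact Or.inr le_rfl
          · exact Or.inr (hle' q hq')
      have hcnt := countP_ge_succ o o0 holt S hnd (hmem (o, c) List.mem_cons_self) hcov
      rw [auxTriples, if_neg ho]
      have : ((S.countP (fun v => decide (o0 ≤ v)) : Int)) + 1
          = ((S.countP (fun v => decide (o ≤ v)) : Int)) := by rw [hcnt]; push_cast; ring
      rw [this, ih o hpw' hle' hmem' hS']
      simp

-- sorted-order lemma for sorted2 with reverse=True: first components are non-increasing
theorem pairwise_insertBy {α : Type} (before : α → α → Bool)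
    (hasym : ∀ a b, before a b = true → before b a = false)
    (htot : ∀ x y z, before x y = true → before z y = false → before z x = false)
    (x : α) : ∀ (ys : List α), ys.Pairwise (fun a b => before b a = false) →
      (PySem.List.insertBy before x ys).Pairwise (fun a b => before b a = false) := by
  intro ys
  induction ys with
  | nil => intro _; simp [PySem.List.insertBy]
  | cons y t ih =>
    intro h
    have hy := (List.pairwise_cons.mp h).1
    have ht := (List.pairwise_cons.mp h).2
    by_cases hb : before x y = true
    · rw [show PySem.List.insertBy before x (y :: t) = x :: y :: t by simp [PySem.List.insertBy, hb]]
      refine List.pairwise_cons.mpr ⟨?_, h⟩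
      intro z hz
      rcases List.mem_cons.mp hz with rfl | hz'
      · exact hasym x z hb
      · exact htot x y z hb (hy z hz')
    · rw [show PySem.List.insertBy before x (y :: t) = y :: PySem.List.insertBy before x t by
        simp [PySem.List.insertBy, hb]]
      refine List.pairwise_cons.mpr ⟨?_, ih ht⟩
      intro z hz
      rcases (PySem.List.mem_insertBy before x z t).mp hz with rfl | hz'
      · exact Bool.not_eq_true _ ▸ (by simpa using hb)
      · exact hy z hz'

-- the lexicographic strict comparison sorted2 uses on (Int, String) pairs
def lexLt (a b : Int × String) : Bool :=
  decide (a.1 < b.1) || (!decide (b.1 < a.1) && decide (a.2 < b.2))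

theorem lexLt_asym (a b : Int × String) : lexLt a b = true → lexLt b a = false := by
  intro h
  cases hba : lexLt b a
  · rfl
  · exfalso
    simp only [lexLt, Bool.or_eq_true, Bool.and_eq_true, Bool.not_eq_true',
      decide_eq_true_eq, decide_eq_false_iff_not] at h hba
    rcases h with h | ⟨h1, h2⟩ <;> rcases hba with g | ⟨g1, g2⟩
    · exact absurd g (not_lt_of_gt h)
    · exact g1 h
    · exact h1 g
    · exact absurd g2 (not_lt_of_gt h2)

theorem lexLt_trans (a b c : Int × String) : lexLt a b = true → lexLt b c = true → lexLt a c = true := by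
  simp only [lexLt, Bool.or_eq_true, Bool.and_eq_true, Bool.not_eq_true', decide_eq_true_eq,
    decide_eq_false_iff_not]
  rintro (h | ⟨h1, h2⟩) (g | ⟨g1, g2⟩)
  · exact Or.inl (lt_trans h g)
  · exact Or.inl (lt_of_lt_of_le h (le_of_not_gt g1))
  · exact Or.inl (lt_of_le_of_lt (le_of_not_gt h1) g)
  · exact Or.inr ⟨fun hc => h1 (lt_of_le_of_lt (le_of_not_gt g1) hc), lt_trans h2 g2⟩

theorem sorted2_rev_fst_pairwise (xs : List (Int × String)) :
    (PySem.List.sorted2 xs (fun p => p.1) (fun p => p.2) true).Pairwise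
      (fun a b => b.1 ≤ a.1) := by
  have key : ∀ (l : List (Int × String)) (acc : List (Int × String)),
      acc.Pairwise (fun a b => lexLt a b = false) →
      (l.foldl (fun acc x => PySem.List.insertBy (fun a b => lexLt b a) x acc) acc).Pairwise
        (fun a b => lexLt a b = false) := by
    intro l
    induction l with
    | nil => intro acc h; exact h
    | cons x t ih =>
      intro acc h
      refine ih _ ?_
      have := pairwise_insertBy (fun a b => lexLt b a)
        (fun a b hab => lexLt_asym b a hab)
        (fun x y z hxy hzy => by
          have hxy' : lexLt y x = true := hxy
          have hzy' : lexLt y z = false := hzy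
          show lexLt x z = false
          cases hxz : lexLt x z
          · rfl
          · exfalso
            have := lexLt_trans y x z hxy' hxz
            rw [this] at hzy'
            exact Bool.true_eq_false.mp hzy') x acc h
      exact this
  have hmain := key xs [] (by simp)
  have : PySem.List.sorted2 xs (fun p => p.1) (fun p => p.2) true
      = xs.foldl (fun acc x => PySem.List.insertBy (fun a b => lexLt b a) x acc) [] := by
    simp only [PySem.List.sorted2, lexLt]
    rfl
  rw [this]
  refine hmain.imp ?_
  intro a b hab
  simp only [lexLt, Bool.or_eq_false_iff, Bool.and_eq_false_iff, decide_eq_false_iff_not] at hab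
  exact le_of_not_gt hab.1

-- main: A's tree, mapped to rows, equals B's per-row closed-form ranks
theorem rows_eq (freq_list : List (Int × String)) :
    let ys := PySem.List.sorted2 freq_list (fun p => p.1) (fun p => p.2) true
    let S : List Int := PySem.Set.ofList (freq_list.map (fun p => p.1))
    (ys.foldl aStep []).map (fun n => fmtRow n.1 n.2.1 n.2.2)
      = ys.map (fun p => fmtRow p.2 p.1 ((S.countP (fun v => decide (p.1 ≤ v)) : Int))) := by
  intro ys S
  have hnd : S.Nodup := PySem.Set.nodup_ofList _
  have hperm : ys.Perm freq_list := PySem.List.sorted2_perm _ _ _ _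
  have hpw : ys.Pairwise (fun a b => b.1 ≤ a.1) := sorted2_rev_fst_pairwise freq_list
  have hmemS : ∀ p ∈ ys, p.1 ∈ S := by
    intro p hp
    rw [show S = PySem.Set.ofList (freq_list.map (fun p => p.1)) from rfl,
      PySem.Set.mem_ofList]
    exact List.mem_map_of_mem (hperm.mem_iff.mp hp)
  have hSmem : ∀ v ∈ S, ∃ p ∈ ys, v = p.1 := by
    intro v hv
    rw [show S = PySem.Set.ofList (freq_list.map (fun p => p.1)) from rfl,
      PySem.Set.mem_ofList, List.mem_map] at hv
    obtain ⟨p, hp, rfl⟩ := hv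
    exact ⟨p, hperm.mem_iff.mpr hp, rfl⟩
  cases hys : ys with
  | nil => simp
  | cons p t =>
    obtain ⟨o, c⟩ := p
    rw [hys] at hpw hmemS hSmem
    have hhd := (List.pairwise_cons.mp hpw).1
    have hmax : ∀ v ∈ S, v ≤ o := by
      intro v hv
      obtain ⟨q, hq, rfl⟩ := hSmem v hv
      rcases List.mem_cons.mp hq with rfl | hq'
      · exact le_rfl
      · exact hhd q hq'
    have h1 : S.countP (fun v => decide (o ≤ v)) = 1 :=
      countP_ge_max o S hnd (hmemS (o, c) List.mem_cons_self) hmax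
    have ha : aStep [] (o, c) = [(c, o, 1)] := by simp [aStep]
    rw [List.foldl_cons, ha, foldl_aStep_eq t [(c, o, 1)] c o 1 (by simp)]
    have h1' : (1 : Int) = ((S.countP (fun v => decide (o ≤ v)) : Int)) := by
      rw [h1]; rfl
    rw [show auxTriples o 1 t = auxTriples o ((S.countP (fun v => decide (o ≤ v)) : Int)) t by
        rw [← h1']]
    rw [auxTriples_eq_rank S hnd t o (List.pairwise_cons.mp hpw).2
      (fun q hq => hhd q hq)
      (fun q hq => hmemS q (List.mem_cons_of_mem _ hq))
      (by
        intro v hv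
        obtain ⟨q, hq, rfl⟩ := hSmem v hv
        rcases List.mem_cons.mp hq with rfl | hq'
        · exact Or.inl le_rfl
        · exact Or.inr ⟨q, hq', rfl⟩)]
    simp [h1']

-- ===== VERDICT (by name: the statement is the Claim_ definition above) =====
theorem get_ideal_tree_spec : Claim_equal_get_ideal_tree := by
  intro freq_list _
  unfold Spec_get_ideal_tree
  have hcl : ∀ p : Int × String,
      (PySem.Set.ofList (freq_list.map (fun p => p.1))).foldl
          (fun s o => if p.1 ≤ o then s + 1 else s) (0 : Int)
        = (((PySem.Set.ofList (freq_list.map (fun p => p.1))).countP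
            (fun v => decide (p.1 ≤ v)) : Int)) := by
    intro p
    rw [PySem.List.foldl_ite_add_one (fun o => p.1 ≤ o)]
    simp
  simp only [get_ideal_tree, get_ideal_tree_alt, hcl,
    PySem.List.foldl_append_singleton_eq_map]
  rw [rows_eq freq_list]
  rfl
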